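-- pv_equiv track=rewrite | github.com/elphabecca/random | asana_availability.py | smartAssigning
-- ===== SOURCE A (Python) =====
-- def smartAssigning(names, statuses, projects, tasks):
--
--     available_people = {}
--
--     for i, name in enumerate(names):
--         if not statuses[i]:
--             available_people[name] = (tasks[i], projects[i])
--
--     highest_availability = None
--     curr_pair = None
--
--     for name, pair in available_people.items():
--         if curr_pair == None or pair < curr_pair:
--             highest_availability = name
--             curr_pair = pair
--
--     return highest_availability
-- ===== SOURCE B (Python) =====
-- def smartAssigning(names, statuses, projects, tasks):
--     available = {}
--     for name, busy, t, p in zip(names, statuses, tasks, projects):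
--         if not busy:
--             available[name] = (t, p)
--     ordered = sorted(available.items(), key=lambda kv: kv[1])
--     return ordered[0][0] if ordered else None
-- ===== Notes on version B (the rewrite author's own statement) =====
-- stated objective: alternative
-- what changed: B replaces A's hand-rolled first-minimum scan (explicit name/pair accumulator with strict '<') by sorting the available items by their (tasks, projects) pair with a stable sort and taking the head, relying on stability for A's first-minimum tie-break; the dedup dict is built from zip instead of enumerate+indexing.
import Mathlib
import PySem

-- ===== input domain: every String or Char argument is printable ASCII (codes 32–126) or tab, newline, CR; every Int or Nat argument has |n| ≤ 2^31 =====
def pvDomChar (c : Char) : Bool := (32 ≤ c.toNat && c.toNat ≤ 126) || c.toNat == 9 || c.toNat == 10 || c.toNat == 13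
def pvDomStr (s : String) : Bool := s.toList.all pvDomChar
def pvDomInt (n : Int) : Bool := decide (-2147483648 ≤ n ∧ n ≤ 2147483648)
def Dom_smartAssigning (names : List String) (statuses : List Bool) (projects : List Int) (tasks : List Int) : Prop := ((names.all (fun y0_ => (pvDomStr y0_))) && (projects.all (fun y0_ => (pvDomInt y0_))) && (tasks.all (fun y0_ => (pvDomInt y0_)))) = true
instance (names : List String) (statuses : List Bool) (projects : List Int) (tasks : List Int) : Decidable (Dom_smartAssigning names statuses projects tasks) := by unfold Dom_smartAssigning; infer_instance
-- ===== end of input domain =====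

-- B replaces A's hand-rolled first-minimum scan by a stable sort of the available items by pair and taking the head (stability gives A's tie-break); alternative decomposition, not faster.

-- ===== PORT A =====
-- Python's '<' on int pairs (lexicographic)
def pvPairLt (a b : Int × Int) : Bool := a.1 < b.1 || (a.1 == b.1 && a.2 < b.2)

def smartAssigning (names : List String) (statuses : List Bool) (projects : List Int) (tasks : List Int) : Option String :=
  -- for i, name in enumerate(names): if not statuses[i]: available_people[name] = (tasks[i], projects[i])
  -- (statuses[i]/tasks[i]/projects[i] raise outside range: Pre_ excludes that; the port skips via getD)
  let available : PySem.Dict String (Int × Int) :=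
    (PySem.List.enumerate names).foldl
      (fun d p =>
        if (PySem.List.pyGet? statuses p.1).getD true = false then
          d.insert p.2 ((PySem.List.pyGet? tasks p.1).getD 0, (PySem.List.pyGet? projects p.1).getD 0)
        else d)
      PySem.Dict.empty
  -- for name, pair in available_people.items(): if curr_pair == None or pair < curr_pair: ...
  let r :=
    available.items.foldl
      (fun (st : Option String × Option (Int × Int)) x =>
        match st.2 with
        | none => (some x.1, some x.2)
        | some cp => if pvPairLt x.2 cp then (some x.1, some x.2) else st)
      (none, none)
  r.1

-- ===== PORT B =====
def smartAssigning_alt (names : List String) (statuses : List Bool) (projects : List Int) (tasks : List Int) : Option String :=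
  -- for name, busy, t, p in zip(...): if not busy: available[name] = (t, p)
  let available : PySem.Dict String (Int × Int) :=
    (names.zip (statuses.zip (tasks.zip projects))).foldl
      (fun d x => if !x.2.1 then d.insert x.1 x.2.2 else d)
      PySem.Dict.empty
  -- ordered = sorted(available.items(), key=lambda kv: kv[1]); return ordered[0][0] if ordered else None
  match PySem.List.sorted2 available.items (fun kv => kv.2.1) (fun kv => kv.2.2) with
  | [] => none
  | kv :: _ => some kv.1

-- ===== PRECONDITION & SPEC =====
-- Pre_ holds exactly when A returns: every index of names is in range of statuses, and
-- tasks/projects are indexed (hence must be in range) exactly at the unavailable (false) positions.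
def Pre_smartAssigning (names : List String) (statuses : List Bool) (projects : List Int) (tasks : List Int) : Prop :=
  names.length ≤ statuses.length ∧
  ∀ i : Nat, i < names.length → statuses.getD i true = false →
    i < tasks.length ∧ i < projects.length
instance (names : List String) (statuses : List Bool) (projects : List Int) (tasks : List Int) : Decidable (Pre_smartAssigning names statuses projects tasks) := by unfold Pre_smartAssigning; infer_instance

def pvWitness_smartAssigning : List String × List Bool × List Int × List Int :=
  (["ann", "bob", "cat"], [false, true, false], [2, 5, 2], [3, 0, 1])

def Spec_smartAssigning (names : List String) (statuses : List Bool) (projects : List Int) (tasks : List Int) (out : Option String) : Prop := out = smartAssigning_alt names statuses projects tasks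
instance (names : List String) (statuses : List Bool) (projects : List Int) (tasks : List Int) (out : Option String) : Decidable (Spec_smartAssigning names statuses projects tasks out) := by unfold Spec_smartAssigning; infer_instance

-- ===== CLAIM (what is proved, stated in full; the proofs are below) =====
def Claim_equal_smartAssigning : Prop := ∀ (names : List String) (statuses : List Bool) (projects : List Int) (tasks : List Int), Dom_smartAssigning names statuses projects tasks → Pre_smartAssigning names statuses projects tasks → Spec_smartAssigning names statuses projects tasks (smartAssigning names statuses projects tasks)

-- ===== LEMMAS AND PROOFS =====

-- A's first loop adds nothing while every status it reads is true
lemma foldA_skip (statuses : List Bool) (projects tasks : List Int) :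
    ∀ (names : List String) (s : Nat) (d : PySem.Dict String (Int × Int)),
    (∀ k : Nat, k < names.length → (PySem.List.pyGet? statuses ((s : Int) + (k : Int))).getD true = true) →
    (PySem.List.enumerate names (s : Int)).foldl
      (fun d p =>
        if (PySem.List.pyGet? statuses p.1).getD true = false then
          d.insert p.2 ((PySem.List.pyGet? tasks p.1).getD 0, (PySem.List.pyGet? projects p.1).getD 0)
        else d)
      d
    = d := by
  intro names
  induction names with
  | nil => intro s d _; simp [PySem.List.enumerate_nil]
  | cons n rest ih =>
    intro s d h
    have h0 := h 0 (by simp)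
    simp only [Int.natCast_zero, Int.add_zero] at h0
    rw [PySem.List.enumerate_cons, List.foldl_cons,
      if_neg (by simp only [h0]; decide),
      show (s : Int) + 1 = ((s + 1 : Nat) : Int) by push_cast; ring]
    exact ih (s + 1) d (by
      intro k hk
      rw [show ((s + 1 : Nat) : Int) + (k : Int) = (s : Int) + ((k + 1 : Nat) : Int) by push_cast; ring]
      exact h (k + 1) (by simpa using Nat.succ_lt_succ hk))

-- A's first loop (over enumerate with indexing) equals B's loop (over the zipped lists)
lemma dict_eq (statuses : List Bool) (projects tasks : List Int) :
    ∀ (names : List String) (s : Nat) (d : PySem.Dict String (Int × Int)),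
    s + names.length ≤ statuses.length →
    (∀ k : Nat, k < names.length → statuses.getD (s + k) true = false →
      s + k < tasks.length ∧ s + k < projects.length) →
    (PySem.List.enumerate names (s : Int)).foldl
      (fun d p =>
        if (PySem.List.pyGet? statuses p.1).getD true = false then
          d.insert p.2 ((PySem.List.pyGet? tasks p.1).getD 0, (PySem.List.pyGet? projects p.1).getD 0)
        else d)
      d
    = (names.zip ((statuses.drop s).zip ((tasks.drop s).zip (projects.drop s)))).foldl
        (fun d x => if !x.2.1 then d.insert x.1 x.2.2 else d)
        d := by
  intro names
  induction names with
  | nil => intro s d _ _; simp [PySem.List.enumerate_nil]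
  | cons n rest ih =>
    intro s d h1 h2
    have hs : s < statuses.length := by simp at h1; omega
    have hstep : ((s : Int) + 1) = ((s + 1 : Nat) : Int) := by push_cast; ring
    rw [PySem.List.enumerate_cons, List.foldl_cons, hstep,
      List.drop_eq_getElem_cons hs]
    have hget : (PySem.List.pyGet? statuses (s : Int)).getD true = statuses[s] := by
      rw [PySem.List.pyGet?_natCast]
      simp [List.getElem?_eq_getElem hs]
    have hgetD : statuses.getD s true = statuses[s] := by
      simp [List.getD, List.getElem?_eq_getElem hs]
    have hIH : ∀ d' : PySem.Dict String (Int × Int),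
        (PySem.List.enumerate rest ((s + 1 : Nat) : Int)).foldl
          (fun d p =>
            if (PySem.List.pyGet? statuses p.1).getD true = false then
              d.insert p.2 ((PySem.List.pyGet? tasks p.1).getD 0, (PySem.List.pyGet? projects p.1).getD 0)
            else d)
          d'
        = (rest.zip ((statuses.drop (s + 1)).zip ((tasks.drop (s + 1)).zip (projects.drop (s + 1))))).foldl
            (fun d x => if !x.2.1 then d.insert x.1 x.2.2 else d)
            d' := by
      intro d'
      refine ih (s + 1) d' (by simp at h1 ⊢; omega) ?_
      intro k hk hf
      have := h2 (k + 1) (by simpa using Nat.succ_lt_succ hk) (by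
        rw [show s + (k + 1) = s + 1 + k by omega]; exact hf)
      constructor <;> omega
    by_cases hst : statuses[s] = false
    · -- status false: both sides insert (tasks[s], projects[s])
      have hb := h2 0 (by simp) (by rw [Nat.add_zero, hgetD]; exact hst)
      simp only [Nat.add_zero] at hb
      have hta : s < tasks.length := hb.1
      have hpr : s < projects.length := hb.2
      rw [List.drop_eq_getElem_cons hta, List.drop_eq_getElem_cons hpr]
      have hta' : (PySem.List.pyGet? tasks (s : Int)).getD 0 = tasks[s] := by
        rw [PySem.List.pyGet?_natCast]; simp [List.getElem?_eq_getElem hta]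
      have hpr' : (PySem.List.pyGet? projects (s : Int)).getD 0 = projects[s] := by
        rw [PySem.List.pyGet?_natCast]; simp [List.getElem?_eq_getElem hpr]
      simp only [List.zip_cons_cons, List.foldl_cons, hget, hta', hpr', hst,
        if_true, Bool.not_false]
      exact hIH _
    · -- status true: A skips the index; B skips the zipped entry (if any)
      have hst' : statuses[s] = true := by revert hst; cases statuses[s] <;> simp
      by_cases hrange : s < tasks.length ∧ s < projects.length
      · rw [List.drop_eq_getElem_cons hrange.1, List.drop_eq_getElem_cons hrange.2]
        simp only [List.zip_cons_cons, List.foldl_cons, hget, hst', Bool.not_true,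
          Bool.true_eq_false, if_false, Bool.false_eq_true]
        exact hIH _
      · -- tasks or projects exhausted: B's zip is empty, and A adds nothing further
        have hzip : ((tasks.drop s).zip (projects.drop s)) = [] := by
          rcases not_and_or.mp hrange with h | h
          · rw [show tasks.drop s = [] from List.drop_eq_nil_of_le (by omega)]; simp
          · rw [show projects.drop s = [] from List.drop_eq_nil_of_le (by omega)]; simp
        rw [hzip]
        simp only [List.zip_nil_right, List.foldl_nil]
        rw [if_neg (by simp only [hget, hst']; decide)]
        apply foldA_skip
        intro k hk
        rw [show ((s + 1 : Nat) : Int) + (k : Int) = ((s + 1 + k : Nat) : Int) by push_cast; ring,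
          PySem.List.pyGet?_natCast]
        by_cases hin : s + 1 + k < statuses.length
        · simp only [List.getElem?_eq_getElem hin, Option.getD_some]
          by_contra hfalse
          have hf : statuses.getD (s + 1 + k) true = false := by
            simp only [List.getD, List.getElem?_eq_getElem hin, Option.getD_some]
            revert hfalse; cases statuses[s+1+k] <;> simp
          have := h2 (1 + k) (by simp only [List.length_cons]; omega) (by
            rw [show s + (1 + k) = s + 1 + k by omega]; exact hf)
          omega
        · rw [List.getElem?_eq_none (by omega)]; rfl

-- pvPairLt is exactly the strict comparison sorted2's 'before' uses
lemma pairLt_eq_sortedCmp (a b : Int × Int) :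
    pvPairLt a b = (decide (a.1 < b.1) || !decide (b.1 < a.1) && decide (a.2 < b.2)) := by
  simp only [pvPairLt]
  by_cases h1 : a.1 < b.1
  · simp [h1]
  · by_cases h2 : b.1 < a.1
    · have : ¬ a.1 = b.1 := by omega
      simp [h2, this]
    · have : a.1 = b.1 := by omega
      simp [this]

-- the first-minimum scan step under a strict comparator (shared by the two lemmas below)
def pvScanStep {α : Type} (before : α → α → Bool) (m : Option α) (x : α) : Option α :=
  match m with
  | none => some x
  | some mm => if before x mm then some x else some mm

-- A's second loop computes (as an Option item fold) the first minimum under sorted2's comparator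
lemma minloop_eq (l : List (String × (Int × Int))) :
    ∀ (m : Option (String × (Int × Int))),
    (l.foldl
      (fun (st : Option String × Option (Int × Int)) x =>
        match st.2 with
        | none => (some x.1, some x.2)
        | some cp => if pvPairLt x.2 cp then (some x.1, some x.2) else st)
      (m.map (·.1), m.map (·.2))).1
    = (l.foldl
        (pvScanStep (fun x mm => (decide (x.2.1 < mm.2.1) || !decide (mm.2.1 < x.2.1) && decide (x.2.2 < mm.2.2))))
        m).map (·.1) := by
  induction l with
  | nil => intro m; simp
  | cons x t ih =>
    intro m
    cases m with
    | none =>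
      simp only [List.foldl_cons, Option.map_none, pvScanStep]
      exact ih (some x)
    | some mm =>
      by_cases hb : pvPairLt x.2 mm.2 = true
      · have hb' : (decide (x.2.1 < mm.2.1) || !decide (mm.2.1 < x.2.1) && decide (x.2.2 < mm.2.2)) = true := by
          rw [← pairLt_eq_sortedCmp]; exact hb
        simp only [List.foldl_cons, Option.map_some, pvScanStep, hb, hb', if_true]
        exact ih (some x)
      · have hb0 : pvPairLt x.2 mm.2 = false := by
          revert hb; cases pvPairLt x.2 mm.2 <;> simp
        have hb' : (decide (x.2.1 < mm.2.1) || !decide (mm.2.1 < x.2.1) && decide (x.2.2 < mm.2.2)) = false := by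
          rw [← pairLt_eq_sortedCmp]; exact hb0
        simp only [List.foldl_cons, Option.map_some, pvScanStep, hb0, hb', Bool.false_eq_true, if_false]
        exact ih (some mm)

-- inserting into a list only changes the head when the new element beats it
lemma head_insertBy {α : Type} (before : α → α → Bool) (x : α) (ys : List α) :
    (PySem.List.insertBy before x ys).head? = pvScanStep before ys.head? x := by
  cases ys with
  | nil => rfl
  | cons y t =>
    cases hb : before x y <;> simp [PySem.List.insertBy, pvScanStep, hb]

-- the head of an insertion-sort fold is the first-minimum scan of the processed elements
lemma head_foldl_insertBy {α : Type} (before : α → α → Bool) :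
    ∀ (l acc : List α),
    (l.foldl (fun acc x => PySem.List.insertBy before x acc) acc).head? =
    l.foldl (pvScanStep before) acc.head? := by
  intro l
  induction l with
  | nil => intro acc; rfl
  | cons x t ih =>
    intro acc
    simp only [List.foldl_cons]
    rw [ih (PySem.List.insertBy before x acc), head_insertBy]

-- the 'match' B's port ends with is Option.map of the first component on head?
lemma headMatch_eq_map (l : List (String × (Int × Int))) :
    (match l with | [] => none | kv :: _ => some kv.1) = l.head?.map (fun x => x.1) := by
  cases l <;> rfl

-- ===== VERDICT (by name: the statement is the Claim_ definition above) =====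
theorem smartAssigning_spec : Claim_equal_smartAssigning := by
  intro names statuses projects tasks _ hpre
  obtain ⟨h1, h2⟩ := hpre
  unfold Spec_smartAssigning smartAssigning smartAssigning_alt
  have hd := dict_eq statuses projects tasks names 0 PySem.Dict.empty (by omega)
    (by intro k hk hf; rw [Nat.zero_add] at hf; have := h2 k hk hf; omega)
  simp only [Int.natCast_zero, List.drop_zero] at hd
  rw [hd]
  set L := (((names.zip (statuses.zip (tasks.zip projects))).foldl
      (fun d x => if !x.2.1 then d.insert x.1 x.2.2 else d) PySem.Dict.empty).items) with hL
  have hm := minloop_eq L none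
  simp only [Option.map_none] at hm
  rw [headMatch_eq_map]
  have hsort : PySem.List.sorted2 L (fun kv => kv.2.1) (fun kv => kv.2.2)
      = L.foldl
          (fun acc x =>
            PySem.List.insertBy
              (fun a b => (decide (a.2.1 < b.2.1) || !decide (b.2.1 < a.2.1) && decide (a.2.2 < b.2.2)))
              x acc)
          [] := rfl
  rw [hsort]
  rw [hm, head_foldl_insertBy]
  rfl
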